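-- pv_equiv track=rewrite | github.com/purple-phoenix/dailyprogrammer | python/378-havel-hakimi/havel_hakimi.py | _reduce_first_n_by_one_helper
-- ===== SOURCE A (Python) =====
-- from typing import List
--
-- Responses = List[int]
--
-- def _reduce_first_n_by_one_helper(first_n: int,
--                    sorted_responses: Responses,
--                    processed_responses,
--                    accum: int) -> Responses:
--
--     if first_n == accum:
--         return processed_responses + sorted_responses
--     else:
--         processed_response = sorted_responses[0] - 1
--         rest_of_responses = sorted_responses[1:]
--         return _reduce_first_n_by_one_helper(first_n,
--                               rest_of_responses,
--                               processed_responses + [processed_response],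
--                               accum + 1
--                               )
-- ===== SOURCE B (Python) =====
-- from typing import List
--
-- Responses = List[int]
--
-- def _reduce_first_n_by_one_helper(first_n: int,
--                    sorted_responses: Responses,
--                    processed_responses,
--                    accum: int) -> Responses:
--     # Iterative version: explicit while loop popping the front instead of recursion.
--     result = list(processed_responses)
--     work = list(sorted_responses)
--     while accum != first_n:
--         result.append(work.pop(0) - 1)
--         accum += 1
--     return result + work
-- ===== Notes on version B (the rewrite author's own statement) =====
-- stated objective: simpler
-- what changed: Replaced the tail recursion (which rebuilds argument lists and can hit Python's recursion limit) with an explicit iterative while loop over a work list.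
import Mathlib
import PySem

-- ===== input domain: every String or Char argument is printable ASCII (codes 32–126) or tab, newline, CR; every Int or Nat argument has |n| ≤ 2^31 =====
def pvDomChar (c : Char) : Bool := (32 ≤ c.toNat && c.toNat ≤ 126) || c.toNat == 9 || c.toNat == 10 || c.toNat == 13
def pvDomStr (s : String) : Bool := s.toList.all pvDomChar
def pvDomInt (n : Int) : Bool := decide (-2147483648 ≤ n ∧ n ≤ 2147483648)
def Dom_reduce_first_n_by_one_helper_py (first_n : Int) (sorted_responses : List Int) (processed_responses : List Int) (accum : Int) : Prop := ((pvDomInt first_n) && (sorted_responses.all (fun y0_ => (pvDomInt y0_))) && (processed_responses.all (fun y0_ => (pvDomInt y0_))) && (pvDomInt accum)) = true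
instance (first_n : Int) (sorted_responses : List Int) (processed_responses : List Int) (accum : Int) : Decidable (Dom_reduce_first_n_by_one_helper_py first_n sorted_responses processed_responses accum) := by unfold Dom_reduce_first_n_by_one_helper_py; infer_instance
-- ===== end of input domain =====

-- B replaces A's tail recursion with an explicit iterative loop over a work list (objective: simpler).


-- ===== PORT A =====
-- Literal port of A's recursion: sorted_responses[0] via pyGet? (none = IndexError,
-- excluded by Pre_), sorted_responses[1:] via slice.
def reduce_first_n_by_one_helper_py (first_n : Int) (sorted_responses : List Int) (processed_responses : List Int) (accum : Int) : List Int :=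
  if first_n = accum then
    processed_responses ++ sorted_responses
  else
    match h : PySem.List.pyGet? sorted_responses 0 with
    | none => []  -- IndexError in Python; outside Pre_
    | some x =>
      reduce_first_n_by_one_helper_py first_n
        (PySem.List.slice sorted_responses (some 1) none)
        (processed_responses ++ [x - 1])
        (accum + 1)
termination_by sorted_responses.length
decreasing_by
  rw [PySem.List.slice_from_one]
  cases sorted_responses with
  | nil => simp [PySem.List.pyGet?, PySem.List.pyIdx?] at h
  | cons y ys => simp

-- ===== PORT B =====
-- The while loop of Source B: state (result, work, accum); each step pops work's front
-- (empty work with accum ≠ first_n is Python's IndexError, outside Pre_).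
def pvLoopB (first_n : Int) (result : List Int) (work : List Int) (accum : Int) : List Int :=
  if accum = first_n then
    result ++ work
  else
    match work with
    | [] => []  -- work.pop(0) raises IndexError in Python; outside Pre_
    | x :: rest => pvLoopB first_n (result ++ [x - 1]) rest (accum + 1)

def reduce_first_n_by_one_helper_py_alt (first_n : Int) (sorted_responses : List Int) (processed_responses : List Int) (accum : Int) : List Int :=
  pvLoopB first_n processed_responses sorted_responses accum

-- ===== PRECONDITION & SPEC =====
-- A raises IndexError unless it reaches first_n == accum before exhausting the list,
-- i.e. unless accum ≤ first_n and first_n - accum ≤ len(sorted_responses).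
def Pre_reduce_first_n_by_one_helper_py (first_n : Int) (sorted_responses : List Int) (processed_responses : List Int) (accum : Int) : Prop :=
  accum ≤ first_n ∧ first_n - accum ≤ (sorted_responses.length : Int)
instance (first_n : Int) (sorted_responses : List Int) (processed_responses : List Int) (accum : Int) : Decidable (Pre_reduce_first_n_by_one_helper_py first_n sorted_responses processed_responses accum) := by unfold Pre_reduce_first_n_by_one_helper_py; infer_instance

def pvWitness_reduce_first_n_by_one_helper_py : Int × List Int × List Int × Int := (2, [3, 3, 2], [], 0)

def Spec_reduce_first_n_by_one_helper_py (first_n : Int) (sorted_responses : List Int) (processed_responses : List Int) (accum : Int) (out : List Int) : Prop := out = reduce_first_n_by_one_helper_py_alt first_n sorted_responses processed_responses accum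
instance (first_n : Int) (sorted_responses : List Int) (processed_responses : List Int) (accum : Int) (out : List Int) : Decidable (Spec_reduce_first_n_by_one_helper_py first_n sorted_responses processed_responses accum out) := by unfold Spec_reduce_first_n_by_one_helper_py; infer_instance

-- ===== CLAIM (what is proved, stated in full; the proofs are below) =====
def Claim_equal_reduce_first_n_by_one_helper_py : Prop := ∀ (first_n : Int) (sorted_responses : List Int) (processed_responses : List Int) (accum : Int), Dom_reduce_first_n_by_one_helper_py first_n sorted_responses processed_responses accum → Pre_reduce_first_n_by_one_helper_py first_n sorted_responses processed_responses accum → Spec_reduce_first_n_by_one_helper_py first_n sorted_responses processed_responses accum (reduce_first_n_by_one_helper_py first_n sorted_responses processed_responses accum)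

-- ===== LEMMAS AND PROOFS =====
theorem pv_agree (sorted_responses : List Int) : ∀ (first_n accum : Int) (processed_responses : List Int),
    accum ≤ first_n → first_n - accum ≤ (sorted_responses.length : Int) →
    reduce_first_n_by_one_helper_py first_n sorted_responses processed_responses accum
      = pvLoopB first_n processed_responses sorted_responses accum := by
  induction sorted_responses with
  | nil =>
    intro fn a pr h1 h2
    have : fn = a := by simp at h2; omega
    rw [reduce_first_n_by_one_helper_py, pvLoopB]
    simp [this]
  | cons x rest ih =>
    intro fn a pr h1 h2
    by_cases hfa : fn = a
    · rw [reduce_first_n_by_one_helper_py, pvLoopB]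
      simp [hfa]
    · have hne : ¬ a = fn := fun h => hfa h.symm
      rw [reduce_first_n_by_one_helper_py, pvLoopB]
      simp only [hfa, hne, if_false, PySem.List.slice_from_one, List.tail_cons]
      have hget : PySem.List.pyGet? (x :: rest) 0 = some x := by
        simp [PySem.List.pyGet?, PySem.List.pyIdx?]
      rw [hget]
      have hlen : ((x :: rest).length : Int) = (rest.length : Int) + 1 := by
        simp
      exact ih fn (a + 1) (pr ++ [x - 1]) (by omega) (by rw [hlen] at h2; omega)

-- ===== VERDICT (by name: the statement is the Claim_ definition above) =====
theorem reduce_first_n_by_one_helper_py_spec : Claim_equal_reduce_first_n_by_one_helper_py := by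
  intro fn sr pr a _ hpre
  exact pv_agree sr fn a pr hpre.1 hpre.2
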